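-- pv_equiv track=rewrite | github.com/komajun365/competitive_programming | JOI/joi2015yo/f3.py | calc_g
-- ===== SOURCE A (Python) =====
-- def calc_g(n1,xy1):
--     g1 = []
--     sums = [(0,0)]
--     for i in range(n1):
--         for j in range(2**i):
--             ax = sums[j][0] + xy1[i][0]
--             ay = sums[j][1] + xy1[i][1]
--             sums.append((ax,ay))
--
--     for i in range(2**n1):
--         a = sums[i]
--         not_i = ((1<<n1)-1)^i
--         j = not_i
--         while(True):
--             b = sums[j]
--             if(a[0]-b[0] >= 0):
--                 g1.append((a[0]-b[0],a[1]-b[1]))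
--             if(j==0):
--                 break
--             j = (j-1) & not_i
--     return g1
-- ===== SOURCE B (Python) =====
-- def calc_g(n1, xy1):
--     # subset sums by doubling
--     sums = [(0, 0)]
--     for (x, y) in xy1[:n1]:
--         sums += [(sx + x, sy + y) for (sx, sy) in sums]
--     m = 1 << n1
--     out = []
--     for i in range(m):
--         ax, ay = sums[i]
--         for j in range(m - 1, -1, -1):
--             if i & j == 0:
--                 bx, by = sums[j]
--                 if ax - bx >= 0:
--                     out.append((ax - bx, ay - by))
--     return out
-- ===== Notes on version B (the rewrite author's own statement) =====
-- stated objective: simpler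
-- what changed: A walks the submask chain of each index's complement via the (j-1)&not_i bit trick; B instead does a plain nested scan over all pairs keeping those with i & j == 0 (j descending), and builds the subset-sum table by doubling instead of indexed appends.
import Mathlib
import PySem

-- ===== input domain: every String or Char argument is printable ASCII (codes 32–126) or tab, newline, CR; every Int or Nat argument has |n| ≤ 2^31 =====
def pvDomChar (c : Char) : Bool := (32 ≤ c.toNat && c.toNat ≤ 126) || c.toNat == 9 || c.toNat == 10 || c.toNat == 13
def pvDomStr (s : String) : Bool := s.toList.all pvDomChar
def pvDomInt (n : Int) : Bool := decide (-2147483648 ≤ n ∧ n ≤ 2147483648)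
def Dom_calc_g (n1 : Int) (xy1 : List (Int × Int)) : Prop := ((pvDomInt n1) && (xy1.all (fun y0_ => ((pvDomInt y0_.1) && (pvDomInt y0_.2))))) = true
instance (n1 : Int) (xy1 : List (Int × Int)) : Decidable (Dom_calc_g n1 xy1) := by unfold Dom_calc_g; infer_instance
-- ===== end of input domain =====

-- B replaces A's submask-chain walk over each complement by a plain nested scan over all
-- (i, j) pairs keeping the disjoint ones (i & j == 0), with j descending: an alternative,
-- simpler-to-read enumeration producing the identical output list.

-- ===== PORT A =====
-- A's inner `while True` loop: visit j, then step to (j-1) & m, stopping after j = 0.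
-- Python lists are dynamic arrays: `sums`/`g1` are ported as Array (append = push, O(1) index);
-- indexing is ported with getD — under Pre_ every index accessed is provably in range, so this is exact.
def calcGLoopA (sums : Array (Int × Int)) (a : Int × Int) (m : Nat) (j : Nat)
    (g : Array (Int × Int)) : Array (Int × Int) :=
  let b := sums.getD j (0, 0)
  let g' := if a.1 - b.1 ≥ 0 then g.push (a.1 - b.1, a.2 - b.2) else g
  if h : j = 0 then g' else calcGLoopA sums a m ((j - 1) &&& m) g'
termination_by j
decreasing_by exact Nat.lt_of_le_of_lt Nat.and_le_left (by omega)

-- Under Pre_ (0 ≤ n1 ≤ len xy1) `n1.toNat` is exact for `range(n1)`, `2**n1` and `(1<<n1)-1`.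
def calc_g (n1 : Int) (xy1 : List (Int × Int)) : List (Int × Int) :=
  let n := n1.toNat
  let sums := (List.range n).foldl (fun s i =>
    (List.range (2 ^ i)).foldl (fun s2 j =>
      s2.push ((s2.getD j (0, 0)).1 + (xy1.getD i (0, 0)).1,
               (s2.getD j (0, 0)).2 + (xy1.getD i (0, 0)).2)) s) #[(0, 0)]
  ((List.range (2 ^ n)).foldl (fun g i =>
    let a := sums.getD i (0, 0)
    let notI := (2 ^ n - 1) ^^^ i
    calcGLoopA sums a notI notI g) #[]).toList

-- ===== PORT B =====
-- `xy1[:n1]` is `take n1.toNat` (exact for 0 ≤ n1); `range(m-1, -1, -1)` is `(range m).reverse`;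
-- `sums`/`out` are Array as above (the list-comprehension extension is `++ map`).
def calc_g_alt (n1 : Int) (xy1 : List (Int × Int)) : List (Int × Int) :=
  let sums := (xy1.take n1.toNat).foldl
    (fun s p => s ++ s.map (fun q => (q.1 + p.1, q.2 + p.2))) #[(0, 0)]
  let m := 2 ^ n1.toNat
  ((List.range m).foldl (fun out i =>
    let a := sums.getD i (0, 0)
    (List.range m).reverse.foldl (fun out j =>
      if i &&& j == 0 then
        let b := sums.getD j (0, 0)
        if a.1 - b.1 ≥ 0 then out.push (a.1 - b.1, a.2 - b.2) else out
      else out) out) #[]).toList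

-- ===== PRECONDITION & SPEC =====
-- Python A raises for n1 < 0 (range(2**n1) on a float) and for n1 > len(xy1) (IndexError on xy1[i]).
def Pre_calc_g (n1 : Int) (xy1 : List (Int × Int)) : Prop := 0 ≤ n1 ∧ n1 ≤ xy1.length
instance (n1 : Int) (xy1 : List (Int × Int)) : Decidable (Pre_calc_g n1 xy1) := by unfold Pre_calc_g; infer_instance
def pvWitness_calc_g : Int × (List (Int × Int)) := (2, [(1, 2), (3, -1)])

def Spec_calc_g (n1 : Int) (xy1 : List (Int × Int)) (out : List (Int × Int)) : Prop := out = calc_g_alt n1 xy1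
instance (n1 : Int) (xy1 : List (Int × Int)) (out : List (Int × Int)) : Decidable (Spec_calc_g n1 xy1 out) := by unfold Spec_calc_g; infer_instance

-- ===== CLAIM (what is proved, stated in full; the proofs are below) =====
def Claim_equal_calc_g : Prop := ∀ (n1 : Int) (xy1 : List (Int × Int)), Dom_calc_g n1 xy1 → Pre_calc_g n1 xy1 → Spec_calc_g n1 xy1 (calc_g n1 xy1)

-- ===== LEMMAS AND PROOFS =====
-- list-level mirrors of the two ports (proof helpers: Arrays are replaced by their toList image)
def calcGLoopL (sums : List (Int × Int)) (a : Int × Int) (m : Nat) (j : Nat)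
    (g : List (Int × Int)) : List (Int × Int) :=
  let b := sums.getD j (0, 0)
  let g' := if a.1 - b.1 ≥ 0 then g ++ [(a.1 - b.1, a.2 - b.2)] else g
  if h : j = 0 then g' else calcGLoopL sums a m ((j - 1) &&& m) g'
termination_by j
decreasing_by exact Nat.lt_of_le_of_lt Nat.and_le_left (by omega)

def calcGListA (n1 : Int) (xy1 : List (Int × Int)) : List (Int × Int) :=
  let n := n1.toNat
  let sums := (List.range n).foldl (fun s i =>
    (List.range (2 ^ i)).foldl (fun s2 j =>
      s2 ++ [((s2.getD j (0, 0)).1 + (xy1.getD i (0, 0)).1,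
              (s2.getD j (0, 0)).2 + (xy1.getD i (0, 0)).2)]) s) [(0, 0)]
  (List.range (2 ^ n)).foldl (fun g i =>
    let a := sums.getD i (0, 0)
    let notI := (2 ^ n - 1) ^^^ i
    calcGLoopL sums a notI notI g) []

def calcGListB (n1 : Int) (xy1 : List (Int × Int)) : List (Int × Int) :=
  let sums := (xy1.take n1.toNat).foldl
    (fun s p => s ++ s.map (fun q => (q.1 + p.1, q.2 + p.2))) [(0, 0)]
  let m := 2 ^ n1.toNat
  (List.range m).foldl (fun out i =>
    let a := sums.getD i (0, 0)
    (List.range m).reverse.foldl (fun out j =>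
      if i &&& j == 0 then
        let b := sums.getD j (0, 0)
        if a.1 - b.1 ≥ 0 then out ++ [(a.1 - b.1, a.2 - b.2)] else out
      else out) out) []

-- Array/List bridge
lemma arr_getD (a : Array (Int × Int)) (i : Nat) (d : Int × Int) :
    a.getD i d = a.toList.getD i d := by
  by_cases h : i < a.size
  · simp [Array.getD, h, List.getD, Array.length_toList]
  · simp [Array.getD, h, List.getD]

lemma foldl_toList {α β : Type} (stepA : Array α → β → Array α) (stepL : List α → β → List α)
    (h : ∀ a x, (stepA a x).toList = stepL a.toList x) :
    ∀ (l : List β) (a : Array α), (l.foldl stepA a).toList = l.foldl stepL a.toList := by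
  intro l
  induction l with
  | nil => intro a; rfl
  | cons x xs ih =>
    intro a
    simp only [List.foldl_cons]
    rw [ih, h]

lemma loopA_toList (sums : Array (Int × Int)) (a : Int × Int) (m : Nat) :
    ∀ j g, (calcGLoopA sums a m j g).toList = calcGLoopL sums.toList a m j g.toList := by
  intro j
  induction j using Nat.strong_induction_on with
  | _ j ih =>
    intro g
    rw [calcGLoopA, calcGLoopL]
    by_cases h0 : j = 0
    · simp only [h0, dif_pos]
      rw [arr_getD]
      split <;> simp
    · simp only [dif_neg h0]
      rw [ih _ (Nat.lt_of_le_of_lt Nat.and_le_left (by omega))]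
      rw [arr_getD]
      split <;> simp

lemma outerA_toList (sumsA : Array (Int × Int)) (m : Nat) (l : List Nat)
    (out : Array (Int × Int)) :
    (l.foldl (fun g i =>
      calcGLoopA sumsA (sumsA.getD i (0, 0)) ((m - 1) ^^^ i) ((m - 1) ^^^ i) g) out).toList
    = l.foldl (fun g i =>
      calcGLoopL sumsA.toList (sumsA.toList.getD i (0, 0)) ((m - 1) ^^^ i) ((m - 1) ^^^ i) g)
      out.toList := by
  refine foldl_toList _ _ ?_ _ _
  intro g i
  rw [loopA_toList, arr_getD]

lemma portA_toList (n1 : Int) (xy1 : List (Int × Int)) : calc_g n1 xy1 = calcGListA n1 xy1 := by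
  simp only [calc_g, calcGListA]
  have hsums :
      ((List.range n1.toNat).foldl (fun s i =>
        (List.range (2 ^ i)).foldl (fun s2 j =>
          s2.push ((s2.getD j (0, 0)).1 + (xy1.getD i (0, 0)).1,
                   (s2.getD j (0, 0)).2 + (xy1.getD i (0, 0)).2)) s) #[(0, 0)]).toList
      = (List.range n1.toNat).foldl (fun s i =>
        (List.range (2 ^ i)).foldl (fun s2 j =>
          s2 ++ [((s2.getD j (0, 0)).1 + (xy1.getD i (0, 0)).1,
                  (s2.getD j (0, 0)).2 + (xy1.getD i (0, 0)).2)]) s) [(0, 0)] := by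
    refine foldl_toList _ _ ?_ _ _
    intro s i
    refine foldl_toList _ _ ?_ _ _
    intro s2 j
    rw [Array.toList_push, arr_getD]
  rw [outerA_toList _ (2 ^ n1.toNat), hsums]

lemma outerB_toList (sumsA : Array (Int × Int)) (m : Nat) (l : List Nat)
    (out : Array (Int × Int)) :
    (l.foldl (fun out i =>
      (List.range m).reverse.foldl (fun out j =>
        if i &&& j == 0 then
          if (sumsA.getD i (0, 0)).1 - (sumsA.getD j (0, 0)).1 ≥ 0 then
            out.push ((sumsA.getD i (0, 0)).1 - (sumsA.getD j (0, 0)).1,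
                      (sumsA.getD i (0, 0)).2 - (sumsA.getD j (0, 0)).2)
          else out
        else out) out) out).toList
    = l.foldl (fun out i =>
      (List.range m).reverse.foldl (fun out j =>
        if i &&& j == 0 then
          if (sumsA.toList.getD i (0, 0)).1 - (sumsA.toList.getD j (0, 0)).1 ≥ 0 then
            out ++ [((sumsA.toList.getD i (0, 0)).1 - (sumsA.toList.getD j (0, 0)).1,
                     (sumsA.toList.getD i (0, 0)).2 - (sumsA.toList.getD j (0, 0)).2)]
          else out
        else out) out) out.toList := by
  refine foldl_toList _ _ ?_ _ _
  intro out i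
  refine foldl_toList _ _ ?_ _ _
  intro out2 j
  rw [arr_getD, arr_getD]
  split
  · split
    · rw [Array.toList_push]
    · rfl
  · rfl

lemma portB_toList (n1 : Int) (xy1 : List (Int × Int)) : calc_g_alt n1 xy1 = calcGListB n1 xy1 := by
  simp only [calc_g_alt, calcGListB]
  have hsums :
      ((xy1.take n1.toNat).foldl
        (fun s p => s ++ s.map (fun q => (q.1 + p.1, q.2 + p.2))) #[(0, 0)]).toList
      = (xy1.take n1.toNat).foldl
        (fun s p => s ++ s.map (fun q => (q.1 + p.1, q.2 + p.2))) [(0, 0)] := by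
    refine foldl_toList _ _ ?_ _ _
    intro s p
    simp
  rw [outerB_toList _ (2 ^ n1.toNat), hsums]

-- bit arithmetic: land through /2 and %2
lemma land_mod_two (a b : Nat) : (a &&& b) % 2 = a % 2 * (b % 2) := by
  have h := Nat.testBit_land a b 0
  simp only [Nat.testBit_zero] at h
  rcases Nat.mod_two_eq_zero_or_one a with ha | ha <;>
  rcases Nat.mod_two_eq_zero_or_one b with hb | hb <;>
  rcases Nat.mod_two_eq_zero_or_one (a &&& b) with hc | hc <;>
  simp [ha, hb, hc] at h ⊢

lemma land_div_two (a b : Nat) : (a &&& b) / 2 = a / 2 &&& b / 2 := by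
  apply Nat.eq_of_testBit_eq
  intro i
  simp [← Nat.testBit_add_one]

-- the gap lemma: (j-1) & m is an upper bound for every submask of m below j
lemma submask_gap : ∀ j m k : Nat, j &&& m = j → 0 < j → k &&& m = k → k < j →
    k ≤ (j - 1) &&& m := by
  intro j
  induction j using Nat.strong_induction_on with
  | _ j ih =>
    intro m k hj hj0 hk hkj
    have hjd : j / 2 &&& m / 2 = j / 2 := by
      conv_rhs => rw [← hj]
      rw [land_div_two]
    have hjm : j % 2 * (m % 2) = j % 2 := by
      conv_rhs => rw [← hj]
      rw [land_mod_two]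
    have hkd : k / 2 &&& m / 2 = k / 2 := by
      conv_rhs => rw [← hk]
      rw [land_div_two]
    have hkm : k % 2 * (m % 2) = k % 2 := by
      conv_rhs => rw [← hk]
      rw [land_mod_two]
    have hj2 := Nat.div_add_mod j 2
    have hk2 := Nat.div_add_mod k 2
    rcases Nat.mod_two_eq_zero_or_one j with hp | hp
    · -- j even; j/2 > 0
      have hj2pos : 0 < j / 2 := by omega
      have e1 : ((j - 1) &&& m) / 2 = (j / 2 - 1) &&& (m / 2) := by
        rw [land_div_two]
        congr 1
        omega
      have e2 : ((j - 1) &&& m) % 2 = (j - 1) % 2 * (m % 2) := land_mod_two _ _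
      have e3 : (j - 1) % 2 = 1 := by omega
      have hsum := Nat.div_add_mod ((j - 1) &&& m) 2
      by_cases hkk : k / 2 < j / 2
      · have ihk := ih (j / 2) (by omega) (m / 2) (k / 2) hjd hj2pos hkd hkk
        have hkm' : k % 2 ≤ m % 2 := by
          rcases Nat.mod_two_eq_zero_or_one m with hm1 | hm1
          · rw [hm1] at hkm
            simp at hkm
            omega
          · omega
        have e2' : ((j - 1) &&& m) % 2 = m % 2 := by rw [e2, e3, one_mul]
        omega
      · omega
    · -- j odd: (j-1) & m = j - 1
      have d1 : ((j - 1) &&& m) / 2 = (j - 1) / 2 := by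
        rw [land_div_two]
        have hh : (j - 1) / 2 = j / 2 := by omega
        rw [hh, hjd]
      have d2 : ((j - 1) &&& m) % 2 = 0 := by
        rw [land_mod_two]
        have hh : (j - 1) % 2 = 0 := by omega
        rw [hh]
        ring
      have hsum := Nat.div_add_mod ((j - 1) &&& m) 2
      have hsum2 := Nat.div_add_mod (j - 1) 2
      omega

-- the sequence of indices A's while-loop visits
def subChain (m j : Nat) : List Nat :=
  j :: (if h : j = 0 then [] else subChain m ((j - 1) &&& m))
termination_by j
decreasing_by exact Nat.lt_of_le_of_lt Nat.and_le_left (by omega)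

lemma loopA_eq_foldl (sums : List (Int × Int)) (a : Int × Int) (m : Nat) :
    ∀ j g, calcGLoopL sums a m j g =
      (subChain m j).foldl (fun g j =>
        if a.1 - (sums.getD j (0, 0)).1 ≥ 0 then
          g ++ [(a.1 - (sums.getD j (0, 0)).1, a.2 - (sums.getD j (0, 0)).2)]
        else g) g := by
  intro j
  induction j using Nat.strong_induction_on with
  | _ j ih =>
    intro g
    rw [calcGLoopL, subChain]
    by_cases h0 : j = 0
    · simp [h0]
    · simp only [dif_neg h0, List.foldl_cons]
      exact ih _ (Nat.lt_of_le_of_lt Nat.and_le_left (by omega)) _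

lemma filter_range_reverse_ext (p : Nat → Bool) (a b : Nat) (hab : a ≤ b)
    (h : ∀ k, a ≤ k → k < b → p k = false) :
    ((List.range b).reverse.filter p) = ((List.range a).reverse.filter p) := by
  induction b, hab using Nat.le_induction with
  | base => rfl
  | succ b hb ihb =>
    rw [List.range_succ, List.reverse_append]
    simp only [List.reverse_cons, List.reverse_nil, List.nil_append, List.singleton_append,
      List.filter_cons]
    rw [h b hb (by omega)]
    exact ihb (fun k hk1 hk2 => h k hk1 (by omega))

lemma subChain_eq_filter : ∀ j m : Nat, j &&& m = j →
    subChain m j = ((List.range (j + 1)).reverse).filter (fun k => k &&& m == k) := by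
  intro j
  induction j using Nat.strong_induction_on with
  | _ j ih =>
    intro m hj
    rw [subChain]
    by_cases h0 : j = 0
    · subst h0
      simp [List.range_succ, Nat.zero_and]
    · simp only [dif_neg h0]
      have hj'sub : ((j - 1) &&& m) &&& m = (j - 1) &&& m := by
        rw [Nat.land_assoc, Nat.and_self]
      have hj'lt : (j - 1) &&& m < j := Nat.lt_of_le_of_lt Nat.and_le_left (by omega)
      have hr : ((List.range (j + 1)).reverse).filter (fun k => k &&& m == k)
          = j :: ((List.range j).reverse).filter (fun k => k &&& m == k) := by
        rw [List.range_succ, List.reverse_append]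
        simp [hj]
      rw [hr, ih _ hj'lt m hj'sub]
      congr 1
      refine (filter_range_reverse_ext _ (((j - 1) &&& m) + 1) j (by omega) ?_).symm
      intro k hk1 hk2
      rw [beq_eq_false_iff_ne]
      intro hksub
      have := submask_gap j m k hj (by omega) hksub hk2
      omega

-- disjointness guard ↔ submask-of-complement, below 2^n
lemma guard_bridge (n i j : Nat) (hj : j < 2 ^ n) :
    (j &&& ((2 ^ n - 1) ^^^ i) == j) = (i &&& j == 0) := by
  rw [Bool.eq_iff_iff]
  simp only [beq_iff_eq]
  have hbig : ∀ t, n ≤ t → j.testBit t = false := by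
    intro t ht
    exact Nat.testBit_lt_two_pow (lt_of_lt_of_le hj (Nat.pow_le_pow_right (by norm_num) ht))
  constructor
  · intro h
    apply Nat.eq_of_testBit_eq
    intro t
    simp only [Nat.testBit_land, Nat.zero_testBit]
    by_cases hjt : j.testBit t
    · have ht : t < n := by
        by_contra h'
        rw [hbig t (by omega)] at hjt
        exact Bool.false_ne_true hjt
      have hmt := congrArg (fun x => x.testBit t) h
      simp only [Nat.testBit_land] at hmt
      rw [hjt] at hmt
      simp only [Bool.true_and] at hmt
      -- hmt : ((2^n-1) ^^^ i).testBit t = true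
      rw [Nat.testBit_xor, Nat.testBit_two_pow_sub_one] at hmt
      simp only [ht, decide_true] at hmt
      -- hmt : (true ^^ i.testBit t) = true
      cases hit : i.testBit t <;> simp [hit] at hmt ⊢
    · simp [hjt]
  · intro h
    apply Nat.eq_of_testBit_eq
    intro t
    simp only [Nat.testBit_land]
    by_cases hjt : j.testBit t
    · have ht : t < n := by
        by_contra h'
        rw [hbig t (by omega)] at hjt
        exact Bool.false_ne_true hjt
      have hit : i.testBit t = false := by
        have := congrArg (fun x => x.testBit t) h
        simp only [Nat.testBit_land, Nat.zero_testBit, Bool.and_eq_false_iff] at this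
        rcases this with h1 | h1
        · exact h1
        · rw [hjt] at h1
          exact absurd h1 (by simp)
      rw [Nat.testBit_xor, Nat.testBit_two_pow_sub_one]
      simp [ht, hit, hjt]
    · simp [hjt]

-- the whole inner loop of A equals B's descending guarded scan
lemma inner_eq (n i : Nat) (hi : i < 2 ^ n) (sums : List (Int × Int)) (g : List (Int × Int)) :
    calcGLoopL sums (sums.getD i (0, 0)) ((2 ^ n - 1) ^^^ i) ((2 ^ n - 1) ^^^ i) g =
    (List.range (2 ^ n)).reverse.foldl (fun out j =>
      if i &&& j == 0 then
        if (sums.getD i (0, 0)).1 - (sums.getD j (0, 0)).1 ≥ 0 then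
          out ++ [((sums.getD i (0, 0)).1 - (sums.getD j (0, 0)).1,
                   (sums.getD i (0, 0)).2 - (sums.getD j (0, 0)).2)]
        else out
      else out) g := by
  have hpow : 0 < 2 ^ n := Nat.pow_pos (by norm_num : (0:ℕ) < 2)
  have hM : ((2 ^ n - 1) ^^^ i) < 2 ^ n :=
    Nat.xor_lt_two_pow (by omega) hi
  rw [loopA_eq_foldl, subChain_eq_filter _ _ (Nat.and_self _)]
  rw [← filter_range_reverse_ext (fun k => k &&& ((2 ^ n - 1) ^^^ i) == k)
        (((2 ^ n - 1) ^^^ i) + 1) (2 ^ n) (by omega) ?hdrop]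
  case hdrop =>
    intro k hk1 hk2
    rw [beq_eq_false_iff_ne]
    intro hsub
    have : k ≤ (2 ^ n - 1) ^^^ i := hsub ▸ Nat.and_le_right
    omega
  rw [← PySem.List.foldl_if_eq_foldl_filter]
  apply PySem.List.foldl_congr_mem
  intro acc j hjmem
  have hj : j < 2 ^ n := by
    have := List.mem_reverse.mp hjmem
    exact List.mem_range.mp this
  rw [guard_bridge n i j hj]

-- building the subset-sum table: A's index-based inner fold appends a mapped copy
lemma foldl_append_map (x : Int × Int) :
    ∀ (k : Nat) (s : List (Int × Int)), k ≤ s.length →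
    (List.range k).foldl (fun s2 j =>
      s2 ++ [((s2.getD j (0, 0)).1 + x.1, (s2.getD j (0, 0)).2 + x.2)]) s
    = s ++ (s.take k).map (fun q => (q.1 + x.1, q.2 + x.2)) := by
  intro k
  induction k with
  | zero => simp
  | succ k ih =>
    intro s hk
    rw [List.range_succ, List.foldl_append, ih s (by omega)]
    simp only [List.foldl_cons, List.foldl_nil]
    have hlt : k < s.length := by omega
    have hgd : (s ++ (s.take k).map (fun q => (q.1 + x.1, q.2 + x.2))).getD k (0, 0)
        = s.getD k (0, 0) := by
      simp [List.getD, List.getElem?_append_left hlt]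
    rw [hgd, List.getD_eq_getElem s (0, 0) hlt]
    have htake : s.take (k + 1) = s.take k ++ [s[k]] := by
      rw [List.take_add_one, List.getElem?_eq_getElem hlt]
      rfl
    rw [htake]
    simp only [List.append_assoc, List.map_append, List.map_take, List.map_cons, List.map_nil]

-- the two subset-sum tables coincide (and have length 2^n)
lemma sums_eq (xy1 : List (Int × Int)) : ∀ n : Nat, n ≤ xy1.length →
    (List.range n).foldl (fun s i =>
      (List.range (2 ^ i)).foldl (fun s2 j =>
        s2 ++ [((s2.getD j (0, 0)).1 + (xy1.getD i (0, 0)).1,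
                (s2.getD j (0, 0)).2 + (xy1.getD i (0, 0)).2)]) s) [(0, 0)]
    = (xy1.take n).foldl (fun s p => s ++ s.map (fun q => (q.1 + p.1, q.2 + p.2))) [(0, 0)]
    ∧ ((xy1.take n).foldl (fun s p => s ++ s.map (fun q => (q.1 + p.1, q.2 + p.2)))
        [(0, 0)]).length = 2 ^ n := by
  intro n
  induction n with
  | zero => exact fun _ => ⟨rfl, rfl⟩
  | succ n ih =>
    intro hn
    obtain ⟨heq, hlen⟩ := ih (by omega)
    have hlt : n < xy1.length := by omega
    have htake : xy1.take (n + 1) = xy1.take n ++ [xy1[n]] := by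
      rw [List.take_add_one, List.getElem?_eq_getElem hlt]
      rfl
    constructor
    · rw [List.range_succ, List.foldl_append, heq]
      simp only [List.foldl_cons, List.foldl_nil]
      rw [foldl_append_map _ _ _ hlen.ge]
      rw [htake, List.foldl_append]
      simp only [List.foldl_cons, List.foldl_nil]
      rw [← hlen, List.take_length]
      rw [List.getD_eq_getElem xy1 (0, 0) hlt]
    · rw [htake, List.foldl_append]
      simp only [List.foldl_cons, List.foldl_nil, List.length_append, List.length_map]
      rw [hlen]
      ring

-- ===== VERDICT (by name: the statement is the Claim_ definition above) =====
theorem calc_g_spec : Claim_equal_calc_g := by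
  intro n1 xy1 _ hpre
  obtain ⟨h0, hlen⟩ := hpre
  unfold Spec_calc_g
  rw [portA_toList, portB_toList]
  simp only [calcGListA, calcGListB]
  have hn : n1.toNat ≤ xy1.length := by omega
  obtain ⟨hseq, _⟩ := sums_eq xy1 n1.toNat hn
  rw [hseq]
  apply PySem.List.foldl_congr_mem
  intro acc i himem
  have hi : i < 2 ^ n1.toNat := List.mem_range.mp himem
  exact inner_eq n1.toNat i hi _ acc
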